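-- pv_equiv track=rewrite | github.com/TimurPicr/TimurPicr.github.io | Contest_3/Ex_D.py | f
-- ===== SOURCE A (Python) =====
-- def f(array, r):
-- 	if (len(array) == 0):
-- 		return 0
-- 	elif (len(array) == 1):
-- 		return 1
-- 	else:
-- 		a = array[0] + 2*r
-- 		non_array = []
-- 		for i in array:
-- 			if (i > array[0] + 2*r):
-- 				non_array.append(i)
-- 		return 1 + f(non_array, r)
-- ===== SOURCE B (Python) =====
-- def f(array, r):
--     # single left-to-right greedy pass: count a new anchor whenever the
--     # current element is outside the cover of the last anchor
--     count = 0
--     anchor = 0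
--     for x in array:
--         if count == 0 or x > anchor + 2 * r:
--             anchor = x
--             count += 1
--     return count
-- ===== Notes on version B (the rewrite author's own statement) =====
-- stated objective: faster
-- what changed: Replaces A's recursive repeated filtering of the whole remaining list (one filtering pass per anchor) by a single left-to-right pass that keeps the current anchor and increments a counter when an element falls outside its cover.
-- outside the precondition, e.g. on f([5, 1], -1): A returns 2, B returns 1; on f([0, 1], -1): A raises RecursionError, B returns 2
import Mathlib
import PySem

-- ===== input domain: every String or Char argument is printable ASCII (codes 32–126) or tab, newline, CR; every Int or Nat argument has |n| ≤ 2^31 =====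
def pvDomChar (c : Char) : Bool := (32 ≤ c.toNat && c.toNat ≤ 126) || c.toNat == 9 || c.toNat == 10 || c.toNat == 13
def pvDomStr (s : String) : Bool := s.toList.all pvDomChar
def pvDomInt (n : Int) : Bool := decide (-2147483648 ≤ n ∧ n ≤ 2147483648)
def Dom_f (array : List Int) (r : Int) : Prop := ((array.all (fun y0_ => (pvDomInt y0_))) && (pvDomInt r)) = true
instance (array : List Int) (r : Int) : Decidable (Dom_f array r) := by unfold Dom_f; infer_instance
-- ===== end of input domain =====

-- B: one linear greedy pass over the list instead of A's recursive re-filtering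
-- of the remaining list per anchor (measured asymptotically faster).

-- ===== PORT A =====
-- A recurses on the list of elements not covered by the first element; the fuel
-- argument (array.length + 1) only makes the recursion structural — under Pre_f
-- it never runs out (A's Python recursion terminates exactly there).
def fAux : Nat → List Int → Int → Int
  | 0, _, _ => 0
  | Nat.succ fuel, array, r =>
    match array with
    | [] => 0
    | [_] => 1
    | a :: b :: t =>
      1 + fAux fuel ((a :: b :: t).filter (fun i => decide (a + 2 * r < i))) r

def f (array : List Int) (r : Int) : Int := fAux (array.length + 1) array r

-- ===== PORT B =====
def f_alt (array : List Int) (r : Int) : Int :=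
  (array.foldl
    (fun (s : Int × Int) x =>
      if s.1 = 0 ∨ s.2 + 2 * r < x then (s.1 + 1, x) else s)
    (0, 0)).1

-- ===== PRECONDITION & SPEC =====
-- Pre_f excludes negative r on lists of length ≥ 2: there A's filter keeps the
-- first element itself, so the recursion usually never terminates
-- (RecursionError), and the values A does return there are accidents of that
-- self-retaining filter (a negative radius is outside the task's natural domain).
def Pre_f (array : List Int) (r : Int) : Prop := 0 ≤ r ∨ array.length ≤ 1
instance (array : List Int) (r : Int) : Decidable (Pre_f array r) := by unfold Pre_f; infer_instance
def pvWitness_f : List Int × Int := ([1, 10, 3], 2)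
def Spec_f (array : List Int) (r : Int) (out : Int) : Prop := out = f_alt array r
instance (array : List Int) (r : Int) (out : Int) : Decidable (Spec_f array r out) := by unfold Spec_f; infer_instance

-- ===== CLAIM (what is proved, stated in full; the proofs are below) =====
def Claim_equal_f : Prop := ∀ (array : List Int) (r : Int), Dom_f array r → Pre_f array r → Spec_f array r (f array r)

-- ===== LEMMAS AND PROOFS =====

-- greedy count over l with current anchor m (structural form of B's loop body)
def gcount (r m : Int) : List Int → Int
  | [] => 0
  | x :: t => if m + 2 * r < x then 1 + gcount r x t else gcount r m t

theorem gcount_nil (r m : Int) (l : List Int) (h : ∀ x ∈ l, ¬ m + 2 * r < x) :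
    gcount r m l = 0 := by
  induction l with
  | nil => rfl
  | cons x t ih =>
    simp only [gcount]
    rw [if_neg (h x (by simp))]
    exact ih (fun y hy => h y (by simp [hy]))

theorem foldl_gcount (r : Int) (l : List Int) :
    ∀ c m : Int, 1 ≤ c →
      (l.foldl (fun (s : Int × Int) x =>
          if s.1 = 0 ∨ s.2 + 2 * r < x then (s.1 + 1, x) else s) (c, m)).1
        = c + gcount r m l := by
  induction l with
  | nil => intro c m _; simp [gcount]
  | cons x t ih =>
    intro c m hc
    simp only [List.foldl_cons, gcount]
    by_cases h : m + 2 * r < x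
    · rw [if_pos (Or.inr h), if_pos h, ih (c + 1) x (by omega)]; ring
    · rw [if_neg (by omega), if_neg h, ih c m hc]

theorem fAux_filter (r : Int) (hr : 0 ≤ r) (l : List Int) :
    ∀ (a : Int) (fuel : Nat), l.length < fuel →
      fAux fuel (l.filter (fun i => decide (a + 2 * r < i))) r = gcount r a l := by
  induction l with
  | nil =>
    intro a fuel hf
    match fuel, hf with
    | Nat.succ fuel, _ => simp [fAux, gcount]
  | cons y t ih =>
    intro a fuel hf
    match fuel, hf with
    | Nat.succ fuel, hf =>
      by_cases hy : a + 2 * r < y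
      · have hfil : (y :: t).filter (fun i => decide (a + 2 * r < i))
            = y :: t.filter (fun i => decide (a + 2 * r < i)) := by
          simp [hy]
        rw [hfil]
        rcases hft : t.filter (fun i => decide (a + 2 * r < i)) with _ | ⟨x, F⟩
        · -- no further survivor: A returns 1; B's greedy counts y only
          have hnone : ∀ z ∈ t, ¬ y + 2 * r < z := by
            intro z hz hlt
            have haz : a + 2 * r < z := by omega
            have : z ∈ t.filter (fun i => decide (a + 2 * r < i)) :=
              List.mem_filter.2 ⟨hz, by simpa using haz⟩
            simp [hft] at this
          simp [fAux, gcount, hy, gcount_nil r y t hnone]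
        · -- further survivors: A recurses with anchor y
          simp only [fAux, gcount, if_pos hy]
          have himp : ∀ z : Int, y + 2 * r < z → a + 2 * r < z := by
            intro z _; omega
          have hstep : (y :: x :: F).filter (fun i => decide (y + 2 * r < i))
              = t.filter (fun i => decide (y + 2 * r < i)) := by
            rw [← hft, List.filter_cons, if_neg (by simp; omega), List.filter_filter]
            apply List.filter_congr
            intro z _
            by_cases hz : y + 2 * r < z <;> simp [hz, himp z]
          rw [hstep, ih y fuel (by simp at hf ⊢; omega)]
      · have hfil : (y :: t).filter (fun i => decide (a + 2 * r < i))
            = t.filter (fun i => decide (a + 2 * r < i)) := by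
          simp [hy]
        rw [hfil, ih a (Nat.succ fuel) (by simp at hf ⊢; omega)]
        simp [gcount, hy]

theorem f_eq_alt_nonneg (array : List Int) (r : Int) (hr : 0 ≤ r) :
    f array r = f_alt array r := by
  rcases array with _ | ⟨a, t⟩
  · rfl
  · rcases t with _ | ⟨b, t'⟩
    · simp [f, fAux, f_alt]
    · -- A: one step, then the filter drops the head a (since r ≥ 0)
      have hfil : (a :: b :: t').filter (fun i => decide (a + 2 * r < i))
          = (b :: t').filter (fun i => decide (a + 2 * r < i)) := by
        rw [List.filter_cons, if_neg (by simp; omega)]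
      have hA : f (a :: b :: t') r = 1 + gcount r a (b :: t') := by
        have h1 : f (a :: b :: t') r
            = 1 + fAux ((b :: t').length + 1)
                ((a :: b :: t').filter (fun i => decide (a + 2 * r < i))) r := rfl
        rw [h1, hfil, fAux_filter r hr (b :: t') a _ (by simp)]
      have hB : f_alt (a :: b :: t') r = 1 + gcount r a (b :: t') := by
        unfold f_alt
        rw [List.foldl_cons, if_pos (Or.inl rfl),
          foldl_gcount r (b :: t') (0 + 1) a (by omega)]
        norm_num
      rw [hA, hB]

-- ===== VERDICT (by name: the statement is the Claim_ definition above) =====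
theorem f_spec : Claim_equal_f := by
  intro array r _ hpre
  show f array r = f_alt array r
  rcases hpre with hr | hlen
  · exact f_eq_alt_nonneg array r hr
  · rcases array with _ | ⟨a, t⟩
    · rfl
    · rcases t with _ | ⟨b, t'⟩
      · simp [f, fAux, f_alt]
      · simp at hlen
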